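-- pv_equiv track=rewrite | github.com/lhillber/qca | simulation/matrix.py | spread_js
-- ===== SOURCE A (Python) =====
-- def spread_js(js):
--     for sys_count in range(2**len(js)):
--         sys_ind = 0
--         for j in js:
--             level = sys_count % 2
--             sys_ind += level * 2**j
--             sys_count = sys_count >> 1
--         yield sys_ind
-- ===== SOURCE B (Python) =====
-- def spread_js(js):
--     # Recursive doubling: process positions from last to first; each position j
--     # doubles the output list by pairing every value v with v + (1 << j).
--     out = [0]
--     for j in reversed(js):
--         w = 1 << j
--         out = [x for v in out for x in (v, v + w)]
--     yield from out
-- ===== Notes on version B (the rewrite author's own statement) =====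
-- stated objective: faster
-- what changed: Replaces the per-count inner bit-extraction loop (n work for each of the 2^n counts) by recursive doubling: fold over the positions from last to first, doubling the output list by pairing each value v with v + 2^j.
-- outside the precondition, e.g. on spread_js([-1]): A returns [0.0, 0.5], B raises ValueError
import Mathlib
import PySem

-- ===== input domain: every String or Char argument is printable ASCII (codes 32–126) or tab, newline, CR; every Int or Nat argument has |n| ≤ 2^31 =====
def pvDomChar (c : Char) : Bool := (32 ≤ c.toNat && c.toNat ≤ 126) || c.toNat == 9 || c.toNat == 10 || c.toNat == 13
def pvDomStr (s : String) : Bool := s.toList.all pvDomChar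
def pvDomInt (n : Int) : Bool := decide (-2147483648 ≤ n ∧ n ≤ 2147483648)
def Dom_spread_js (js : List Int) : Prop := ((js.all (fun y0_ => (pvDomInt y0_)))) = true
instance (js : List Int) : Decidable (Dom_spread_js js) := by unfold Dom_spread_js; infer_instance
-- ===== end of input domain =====

-- B replaces A's per-count inner bit loop by a recursive-doubling fold over the positions (faster).


-- ===== PORT A =====
-- inner 'for j in js' loop: state (sys_ind, sys_count); '2**j' ported as 2 ^ j.toNat
-- (exact for j ≥ 0, which Pre_ guarantees; Python returns floats for j < 0).
def pvInnerA (js : List Int) (st : Int × Int) : Int × Int :=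
  js.foldl (fun st j =>
    (st.1 + (PySem.Int.mod st.2 2) * 2 ^ j.toNat, PySem.Int.floordiv st.2 2)) st

-- generator consumed to a list: one yield per sys_count in range(2**len(js))
def spread_js (js : List Int) : List Int :=
  (PySem.List.pyRange 0 ((2:Int) ^ js.length) 1).map
    (fun sys_count => (pvInnerA js (0, sys_count)).1)

-- ===== PORT B =====
-- fold over reversed(js); '1 << j' ported as 2 ^ j.toNat (exact for j ≥ 0, Pre_; Python raises for j < 0)
def spread_js_alt (js : List Int) : List Int :=
  js.reverse.foldl (fun out j => out.flatMap (fun v => [v, v + 2 ^ j.toNat])) [(0:Int)]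

-- ===== PRECONDITION & SPEC =====
-- Pre_ excludes lists containing a negative position j: there Python A returns floats
-- (2**j is fractional), not values of the declared int type, and B raises ValueError.
def Pre_spread_js (js : List Int) : Prop := ∀ j ∈ js, 0 ≤ j
instance (js : List Int) : Decidable (Pre_spread_js js) := by unfold Pre_spread_js; infer_instance

def pvWitness_spread_js : List Int := [0, 2, 1]

def Spec_spread_js (js : List Int) (out : List Int) : Prop := out = spread_js_alt js
instance (js : List Int) (out : List Int) : Decidable (Spec_spread_js js out) := by unfold Spec_spread_js; infer_instance

-- ===== CLAIM (what is proved, stated in full; the proofs are below) =====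
def Claim_equal_spread_js : Prop := ∀ (js : List Int), Dom_spread_js js → Pre_spread_js js → Spec_spread_js js (spread_js js)

-- ===== LEMMAS AND PROOFS =====

-- B's fold, written as structural recursion on js (foldl over the reverse = foldr).
def pvAltRec : List Int → List Int
  | [] => [(0:Int)]
  | j :: rest => (pvAltRec rest).flatMap (fun v => [v, v + 2 ^ j.toNat])

lemma alt_eq_altRec (js : List Int) : spread_js_alt js = pvAltRec js := by
  unfold spread_js_alt
  rw [List.foldl_reverse]
  induction js with
  | nil => rfl
  | cons j rest ih => simp [pvAltRec, List.foldr, ih]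

lemma innerA_shift (js : List Int) (s c : Int) :
    (pvInnerA js (s, c)).1 = s + (pvInnerA js (0, c)).1 := by
  induction js generalizing s c with
  | nil => simp [pvInnerA]
  | cons j rest ih =>
      simp only [pvInnerA, List.foldl_cons] at *
      rw [ih, ih (0 + PySem.Int.mod c 2 * 2 ^ j.toNat)]
      ring

lemma innerA_cons (j : Int) (rest : List Int) (c : Int) :
    (pvInnerA (j :: rest) (0, c)).1
      = PySem.Int.mod c 2 * 2 ^ j.toNat + (pvInnerA rest (0, PySem.Int.floordiv c 2)).1 := by
  simp only [pvInnerA, List.foldl_cons]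
  rw [show ((0:Int) + PySem.Int.mod c 2 * 2 ^ j.toNat, PySem.Int.floordiv c 2)
        = (PySem.Int.mod c 2 * 2 ^ j.toNat, PySem.Int.floordiv c 2) by ring_nf]
  exact innerA_shift rest _ _

lemma mod_two_mul (c : Int) : PySem.Int.mod (2 * c) 2 = 0 := by
  simp [PySem.Int.mod]

lemma mod_two_mul_add_one (c : Int) : PySem.Int.mod (2 * c + 1) 2 = 1 := by
  simp [PySem.Int.mod]

lemma fdiv_two_mul (c : Int) : PySem.Int.floordiv (2 * c) 2 = c := by
  simp [PySem.Int.floordiv]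

lemma fdiv_two_mul_add_one (c : Int) : PySem.Int.floordiv (2 * c + 1) 2 = c := by
  simp only [PySem.Int.floordiv]
  rw [show 2 * c + 1 = 1 + c * 2 by ring, Int.add_mul_fdiv_right _ _ (by norm_num)]
  norm_num [Int.fdiv]

-- interleaving lemma: a doubled range mapped through f is the flatMap of pairs,
-- whenever f relates to g on even/odd arguments.
lemma doubling (f g : Int → Int) (w : Int)
    (hEven : ∀ c : Int, f (2 * c) = g c) (hOdd : ∀ c : Int, f (2 * c + 1) = g c + w)
    (M : Nat) :
    (PySem.List.pyRange 0 (2 * (M : Int)) 1).map f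
      = ((PySem.List.pyRange 0 (M : Int) 1).map g).flatMap (fun v => [v, v + w]) := by
  induction M with
  | zero => simp [PySem.List.pyRange_one_eq_nil]
  | succ m ih =>
      have h1 : (2 : Int) * ((m : Int) + 1) = (2 * (m : Int) + 1) + 1 := by ring
      push_cast
      rw [h1, PySem.List.pyRange_one_succ_right (show (0:Int) ≤ 2 * (m : Int) + 1 by positivity),
          PySem.List.pyRange_one_succ_right (show (0:Int) ≤ 2 * (m : Int) by positivity),
          PySem.List.pyRange_one_succ_right (show (0:Int) ≤ (m : Int) by positivity)]
      simp only [List.map_append, List.flatMap_append, List.map_cons, List.map_nil,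
        List.flatMap_cons, List.flatMap_nil, List.append_assoc]
      rw [ih, hEven, hOdd]
      simp

lemma A_eq_altRec (js : List Int) : spread_js js = pvAltRec js := by
  induction js with
  | nil =>
      unfold spread_js
      simp [PySem.List.pyRange_one_cons, PySem.List.pyRange_one_eq_nil, pvInnerA, pvAltRec]
  | cons j rest ih =>
      unfold spread_js at *
      have hlen : ((2:Int) ^ (j :: rest).length) = 2 * ((2 ^ rest.length : Nat) : Int) := by
        push_cast
        rw [List.length_cons, pow_succ]
        ring
      have hE : ∀ c : Int, (pvInnerA (j :: rest) (0, 2 * c)).1 = (pvInnerA rest (0, c)).1 := by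
        intro c; rw [innerA_cons, mod_two_mul, fdiv_two_mul]; ring
      have hO : ∀ c : Int,
          (pvInnerA (j :: rest) (0, 2 * c + 1)).1 = (pvInnerA rest (0, c)).1 + 2 ^ j.toNat := by
        intro c; rw [innerA_cons, mod_two_mul_add_one, fdiv_two_mul_add_one]; ring
      rw [hlen, doubling _ _ _ hE hO (2 ^ rest.length)]
      rw [pvAltRec, ← ih]
      push_cast
      rfl

-- ===== VERDICT (by name: the statement is the Claim_ definition above) =====
theorem spread_js_spec : Claim_equal_spread_js := by
  intro js _ _
  unfold Spec_spread_js
  rw [A_eq_altRec, alt_eq_altRec]
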